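-- pv_equiv track=rewrite | github.com/sonya75/NikeAccountGenerator | nikereqpatch.py | modifyheaders
-- ===== SOURCE A (Python) =====
-- from collections import OrderedDict
--
-- def modifyheaders(headers):
--     headerorder=["Host","Connection","Content-Length","X-NewRelic-ID","Origin","User-Agent","Content-Type","Accept","Referer","Accept-Encoding","Accept-Language","Cookie"]
--     finalheader=OrderedDict()
--     for q in headerorder:
--         if q in headers:
--             finalheader[q]=headers[q]
--     for q in headers:
--         finalheader[q]=headers[q]
--     return finalheader
-- ===== SOURCE B (Python) =====
-- from collections import OrderedDict
--
-- def modifyheaders(headers):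
--     headerorder=["Host","Connection","Content-Length","X-NewRelic-ID","Origin","User-Agent","Content-Type","Accept","Referer","Accept-Encoding","Accept-Language","Cookie"]
--     priority = {name: i for i, name in enumerate(headerorder)}
--     buckets = [[] for _ in range(len(headerorder) + 1)]
--     for kv in headers.items():
--         buckets[priority.get(kv[0], len(headerorder))].append(kv)
--     return OrderedDict(kv for bucket in buckets for kv in bucket)
-- ===== Notes on version B (the rewrite author's own statement) =====
-- stated objective: alternative
-- what changed: Replaces A's two passes (a membership test of every priority name against the dict, then a re-insertion pass over the whole dict) with a single bucket-distribution pass keyed by a precomputed name->index map, concatenating the buckets; Pre_ only states the dict invariant (no duplicate keys), which every real dict argument satisfies.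
import Mathlib
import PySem

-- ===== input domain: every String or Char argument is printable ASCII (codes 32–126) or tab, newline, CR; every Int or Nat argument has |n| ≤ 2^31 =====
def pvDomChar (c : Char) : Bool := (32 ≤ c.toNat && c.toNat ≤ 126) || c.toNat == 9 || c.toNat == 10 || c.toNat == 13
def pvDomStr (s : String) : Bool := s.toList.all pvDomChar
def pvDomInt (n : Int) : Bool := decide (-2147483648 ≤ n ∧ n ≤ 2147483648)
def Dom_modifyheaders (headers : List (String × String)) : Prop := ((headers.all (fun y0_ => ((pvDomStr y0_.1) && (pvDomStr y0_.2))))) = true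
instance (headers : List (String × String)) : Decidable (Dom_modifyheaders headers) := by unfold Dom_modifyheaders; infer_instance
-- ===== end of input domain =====

-- B replaces A's two passes (a membership scan of the priority list, then a re-insertion pass over the
-- whole dict) by a one-pass bucket distribution keyed by a precomputed priority index; same return value.

-- ===== PORT A =====
-- the literal headerorder list of A
def pvHeaderOrder : List String :=
  ["Host","Connection","Content-Length","X-NewRelic-ID","Origin","User-Agent","Content-Type","Accept","Referer","Accept-Encoding","Accept-Language","Cookie"]

-- dict lookup 'headers[q]' on the association list (first match), hand-ported: exact for a Python dict
def pvLookup (hs : List (String × String)) (q : String) : Option String :=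
  match hs with
  | [] => none
  | (k, v) :: t => if k = q then some v else pvLookup t q

-- A: 'for q in headerorder: if q in headers: finalheader[q]=headers[q]' then
--    'for q in headers: finalheader[q]=headers[q]'
-- ('if q in headers: … headers[q]' and the always-succeeding 'headers[q]' of the second loop are both
--  written as the same 'match pvLookup …'; the none branch of the second loop is unreachable, q being a key)
def modifyheaders (headers : List (String × String)) : List (String × String) :=
  let finalheader : PySem.Dict String String :=
    pvHeaderOrder.foldl (fun d q =>
      match pvLookup headers q with
      | some v => d.insert q v
      | none => d) PySem.Dict.empty
  let finalheader :=
    (headers.map Prod.fst).foldl (fun d q =>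
      match pvLookup headers q with
      | some v => d.insert q v
      | none => d) finalheader
  finalheader.items

-- ===== PORT B =====
-- B: priority = {name: i for i, name in enumerate(headerorder)}
def pvPriority : PySem.Dict String Int :=
  (PySem.List.enumerate pvHeaderOrder).foldl (fun d p => d.insert p.2 p.1) PySem.Dict.empty

-- B: distribute each item into buckets[priority.get(k, len(headerorder))], then concatenate the buckets
-- into an OrderedDict.  (.toNat is exact: the index is a value 0..11 of priority or the default 12.)
def modifyheaders_alt (headers : List (String × String)) : List (String × String) :=
  let n := pvHeaderOrder.length
  let buckets :=
    headers.foldl (fun bs kv =>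
      let i := (pvPriority.getD kv.1 (n : Int)).toNat
      bs.set i (bs[i]! ++ [kv])) (List.replicate (n + 1) ([] : List (String × String)))
  (PySem.Dict.ofList buckets.flatten).items

-- ===== PRECONDITION & SPEC =====
-- Pre_ only states the dict invariant of the Python argument (a dict[str,str] cannot hold two items
-- with the same key); it excludes no input the Python A can actually receive.
def Pre_modifyheaders (headers : List (String × String)) : Prop := (headers.map Prod.fst).Nodup
instance (headers : List (String × String)) : Decidable (Pre_modifyheaders headers) := by unfold Pre_modifyheaders; infer_instance
def pvWitness_modifyheaders : (List (String × String)) := [("Host", "nike.com"), ("X-Foo", "1"), ("Accept", "*/*")]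

def Spec_modifyheaders (headers : List (String × String)) (out : List (String × String)) : Prop := out = modifyheaders_alt headers
instance (headers : List (String × String)) (out : List (String × String)) : Decidable (Spec_modifyheaders headers out) := by unfold Spec_modifyheaders; infer_instance

-- ===== CLAIM (what is proved, stated in full; the proofs are below) =====
def Claim_equal_modifyheaders : Prop := ∀ (headers : List (String × String)), Dom_modifyheaders headers → Pre_modifyheaders headers → Spec_modifyheaders headers (modifyheaders headers)

-- ===== LEMMAS AND PROOFS =====

-- the common canonical value: priority headers in pvHeaderOrder order, then the rest in original order
def pvKnown (headers : List (String × String)) : List (String × String) :=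
  pvHeaderOrder.filterMap (fun q => (pvLookup headers q).map (fun v => (q, v)))
def pvCanon (headers : List (String × String)) : List (String × String) :=
  pvKnown headers ++ headers.filter (fun kv => !(pvHeaderOrder.contains kv.1))

theorem pvLookup_isSome_iff (hs : List (String × String)) (q : String) :
    (pvLookup hs q).isSome = true ↔ q ∈ hs.map Prod.fst := by
  induction hs with
  | nil => simp [pvLookup]
  | cons p t ih =>
    obtain ⟨k, v⟩ := p
    by_cases h : k = q <;> simp [pvLookup, h, ih]
    exact fun h' => (h h'.symm).elim

theorem insert_noop (d : PySem.Dict String String) (q v : String)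
    (hnd : d.keys.Nodup) (hm : (q, v) ∈ d.items) : d.insert q v = d := by
  have hc : d.contains q = true := by
    rw [PySem.Dict.contains_iff_mem_keys]
    exact List.mem_map.mpr ⟨(q, v), hm, rfl⟩
  apply PySem.Dict.ext
  rw [PySem.Dict.items_insert_of_contains d v hc]
  have h1 : ∀ p ∈ d.items, (if (p.1 == q) = true then (q, v) else p) = id p := by
    intro p hp
    by_cases hpq : p.1 = q
    · have e1 : d.get? p.1 = some p.2 := PySem.Dict.get?_of_mem_items d (by simpa using hp) hnd
      have e2 : d.get? q = some v := PySem.Dict.get?_of_mem_items d hm hnd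
      rw [hpq] at e1; rw [e1] at e2
      obtain rfl : p.2 = v := by injection e2
      subst hpq
      simp
    · simp [hpq]
  rw [List.map_congr_left h1, List.map_id]

theorem foldAB (hs : List (String × String)) (ks : List String) (d : PySem.Dict String String)
    (hks : ks.Nodup) (hnd : d.keys.Nodup)
    (hinv : ∀ p ∈ d.items, pvLookup hs p.1 = some p.2) :
    (ks.foldl (fun d q =>
      match pvLookup hs q with
      | some v => d.insert q v
      | none => d) d).items
    = d.items ++ (ks.filter (fun q => !d.contains q)).filterMap
        (fun q => (pvLookup hs q).map (fun v => (q, v))) := by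
  induction ks generalizing d with
  | nil => simp
  | cons q ks ih =>
    rw [List.nodup_cons] at hks
    rw [List.foldl_cons]
    cases hl : pvLookup hs q with
    | none =>
      simp only [hl]
      rw [ih d hks.2 hnd hinv]
      by_cases hc : d.contains q = true
      · simp [List.filter_cons, hc]
      · simp only [Bool.not_eq_true] at hc
        simp [List.filter_cons, hc, List.filterMap_cons, hl]
    | some v =>
      by_cases hc : d.contains q = true
      · have hqk : q ∈ d.keys := (PySem.Dict.contains_iff_mem_keys d q).mp hc
        obtain ⟨p, hp, hp1⟩ := List.mem_map.mp hqk
        have := hinv p hp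
        rw [hp1, hl] at this
        have hpv : p = (q, v) := by
          obtain ⟨a, b⟩ := p; cases this; cases hp1; rfl
        rw [hpv] at hp
        simp only [hl, insert_noop d q v hnd hp]
        rw [ih d hks.2 hnd hinv]
        simp [List.filter_cons, hc]
      · simp only [Bool.not_eq_true] at hc
        simp only [hl]
        have hitems : (d.insert q v).items = d.items ++ [(q, v)] :=
          PySem.Dict.items_insert_of_not_contains d v hc
        rw [ih (d.insert q v) hks.2 (PySem.Dict.nodup_keys_insert d q v hnd) ?_]
        · rw [hitems]
          have hfc : ks.filter (fun q' => !(d.insert q v).contains q') = ks.filter (fun q' => !d.contains q') := by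
            apply List.filter_congr
            intro q' hq'
            have : q' ≠ q := by rintro rfl; exact hks.1 hq'
            rw [PySem.Dict.contains_insert]
            simp [this]
          rw [hfc]
          simp [List.filter_cons, hc, List.filterMap_cons, hl]
        · intro p hp
          rw [hitems] at hp
          rcases List.mem_append.mp hp with h | h
          · exact hinv p h
          · simp at h; rw [h]; exact hl

theorem map_fst_pvKnown (headers : List (String × String)) :
    (pvKnown headers).map Prod.fst = pvHeaderOrder.filter (fun q => (pvLookup headers q).isSome) := by
  unfold pvKnown
  induction pvHeaderOrder with
  | nil => simp
  | cons q t ih =>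
    cases hl : pvLookup headers q <;>
      simp [List.filterMap_cons, List.filter_cons, hl, ih]

theorem filterMap_keys_filter (hs : List (String × String)) (P : String → Bool)
    (hnd : (hs.map Prod.fst).Nodup) :
    ((hs.map Prod.fst).filter P).filterMap (fun q => (pvLookup hs q).map (fun v => (q, v)))
    = hs.filter (fun kv => P kv.1) := by
  induction hs with
  | nil => simp
  | cons p t ih =>
    obtain ⟨k, v⟩ := p
    simp only [List.map_cons, List.nodup_cons] at hnd
    have hcong : ((t.map Prod.fst).filter P).filterMap (fun q => (pvLookup ((k, v) :: t) q).map (fun w => (q, w)))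
        = ((t.map Prod.fst).filter P).filterMap (fun q => (pvLookup t q).map (fun w => (q, w))) := by
      apply List.filterMap_congr
      intro q hq
      have hqt : q ∈ t.map Prod.fst := List.mem_of_mem_filter hq
      have : k ≠ q := by rintro rfl; exact hnd.1 hqt
      simp [pvLookup, this]
    by_cases hP : P k = true
    · simp only [List.map_cons, List.filter_cons, hP, if_pos, List.filterMap_cons]
      have : pvLookup ((k, v) :: t) k = some v := by simp [pvLookup]
      simp only [this, Option.map_some]
      rw [hcong, ih hnd.2]
    · simp only [Bool.not_eq_true] at hP
      simp only [List.map_cons, List.filter_cons, hP]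
      simp only [Bool.false_eq_true, if_false]
      rw [hcong, ih hnd.2]

theorem pvPriority_eq : pvPriority = PySem.Dict.mk
    [("Host",0),("Connection",1),("Content-Length",2),("X-NewRelic-ID",3),("Origin",4),("User-Agent",5),
     ("Content-Type",6),("Accept",7),("Referer",8),("Accept-Encoding",9),("Accept-Language",10),("Cookie",11)] := by
  decide

theorem pvIdx_eq (q : String) :
    (pvPriority.getD q (12 : Int)).toNat =
      (if q = "Host" then 0 else if q = "Connection" then 1 else if q = "Content-Length" then 2
       else if q = "X-NewRelic-ID" then 3 else if q = "Origin" then 4 else if q = "User-Agent" then 5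
       else if q = "Content-Type" then 6 else if q = "Accept" then 7 else if q = "Referer" then 8
       else if q = "Accept-Encoding" then 9 else if q = "Accept-Language" then 10
       else if q = "Cookie" then 11 else 12 : Nat) := by
  by_cases h1 : q = "Host"
  · subst h1; decide
  by_cases h2 : q = "Connection"
  · subst h2; decide
  by_cases h3 : q = "Content-Length"
  · subst h3; decide
  by_cases h4 : q = "X-NewRelic-ID"
  · subst h4; decide
  by_cases h5 : q = "Origin"
  · subst h5; decide
  by_cases h6 : q = "User-Agent"
  · subst h6; decide
  by_cases h7 : q = "Content-Type"
  · subst h7; decide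
  by_cases h8 : q = "Accept"
  · subst h8; decide
  by_cases h9 : q = "Referer"
  · subst h9; decide
  by_cases h10 : q = "Accept-Encoding"
  · subst h10; decide
  by_cases h11 : q = "Accept-Language"
  · subst h11; decide
  by_cases h12 : q = "Cookie"
  · subst h12; decide
  rw [pvPriority_eq, PySem.Dict.getD_eq_get?_getD]
  simp only [PySem.Dict.get?_mk_cons]
  have hb : ∀ (a : String), q ≠ a → (a == q) = false := fun a h => beq_eq_false_iff_ne.mpr (Ne.symm h)
  rw [if_neg (by simp [hb _ h1]), if_neg (by simp [hb _ h2]), if_neg (by simp [hb _ h3]), if_neg (by simp [hb _ h4]), if_neg (by simp [hb _ h5]), if_neg (by simp [hb _ h6]), if_neg (by simp [hb _ h7]), if_neg (by simp [hb _ h8]), if_neg (by simp [hb _ h9]), if_neg (by simp [hb _ h10]), if_neg (by simp [hb _ h11]), if_neg (by simp [hb _ h12])]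
  have hz : (PySem.Dict.mk ([] : List (String × Int))).get? q = none := rfl
  simp [hz, h1, h2, h3, h4, h5, h6, h7, h8, h9, h10, h11, h12]


theorem pvIdx_lt (q : String) : (pvPriority.getD q (12 : Int)).toNat < 13 := by
  by_cases h1 : q = "Host"
  · subst h1; decide
  by_cases h2 : q = "Connection"
  · subst h2; decide
  by_cases h3 : q = "Content-Length"
  · subst h3; decide
  by_cases h4 : q = "X-NewRelic-ID"
  · subst h4; decide
  by_cases h5 : q = "Origin"
  · subst h5; decide
  by_cases h6 : q = "User-Agent"
  · subst h6; decide
  by_cases h7 : q = "Content-Type"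
  · subst h7; decide
  by_cases h8 : q = "Accept"
  · subst h8; decide
  by_cases h9 : q = "Referer"
  · subst h9; decide
  by_cases h10 : q = "Accept-Encoding"
  · subst h10; decide
  by_cases h11 : q = "Accept-Language"
  · subst h11; decide
  by_cases h12 : q = "Cookie"
  · subst h12; decide
  rw [pvIdx_eq]
  rw [if_neg h1, if_neg h2, if_neg h3, if_neg h4, if_neg h5, if_neg h6, if_neg h7, if_neg h8, if_neg h9, if_neg h10, if_neg h11, if_neg h12]
  omega

theorem pvIdx_beq_0 (q : String) : (((pvPriority.getD q (12:Int)).toNat) == (0:Nat)) = (q == "Host") := by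
  by_cases h1 : q = "Host"
  · subst h1; decide
  by_cases h2 : q = "Connection"
  · subst h2; decide
  by_cases h3 : q = "Content-Length"
  · subst h3; decide
  by_cases h4 : q = "X-NewRelic-ID"
  · subst h4; decide
  by_cases h5 : q = "Origin"
  · subst h5; decide
  by_cases h6 : q = "User-Agent"
  · subst h6; decide
  by_cases h7 : q = "Content-Type"
  · subst h7; decide
  by_cases h8 : q = "Accept"
  · subst h8; decide
  by_cases h9 : q = "Referer"
  · subst h9; decide
  by_cases h10 : q = "Accept-Encoding"
  · subst h10; decide
  by_cases h11 : q = "Accept-Language"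
  · subst h11; decide
  by_cases h12 : q = "Cookie"
  · subst h12; decide
  rw [pvIdx_eq]
  rw [if_neg h1, if_neg h2, if_neg h3, if_neg h4, if_neg h5, if_neg h6, if_neg h7, if_neg h8, if_neg h9, if_neg h10, if_neg h11, if_neg h12]
  simp [h1]
theorem pvIdx_beq_1 (q : String) : (((pvPriority.getD q (12:Int)).toNat) == (1:Nat)) = (q == "Connection") := by
  by_cases h1 : q = "Host"
  · subst h1; decide
  by_cases h2 : q = "Connection"
  · subst h2; decide
  by_cases h3 : q = "Content-Length"
  · subst h3; decide
  by_cases h4 : q = "X-NewRelic-ID"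
  · subst h4; decide
  by_cases h5 : q = "Origin"
  · subst h5; decide
  by_cases h6 : q = "User-Agent"
  · subst h6; decide
  by_cases h7 : q = "Content-Type"
  · subst h7; decide
  by_cases h8 : q = "Accept"
  · subst h8; decide
  by_cases h9 : q = "Referer"
  · subst h9; decide
  by_cases h10 : q = "Accept-Encoding"
  · subst h10; decide
  by_cases h11 : q = "Accept-Language"
  · subst h11; decide
  by_cases h12 : q = "Cookie"
  · subst h12; decide
  rw [pvIdx_eq]
  rw [if_neg h1, if_neg h2, if_neg h3, if_neg h4, if_neg h5, if_neg h6, if_neg h7, if_neg h8, if_neg h9, if_neg h10, if_neg h11, if_neg h12]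
  simp [h2]
theorem pvIdx_beq_2 (q : String) : (((pvPriority.getD q (12:Int)).toNat) == (2:Nat)) = (q == "Content-Length") := by
  by_cases h1 : q = "Host"
  · subst h1; decide
  by_cases h2 : q = "Connection"
  · subst h2; decide
  by_cases h3 : q = "Content-Length"
  · subst h3; decide
  by_cases h4 : q = "X-NewRelic-ID"
  · subst h4; decide
  by_cases h5 : q = "Origin"
  · subst h5; decide
  by_cases h6 : q = "User-Agent"
  · subst h6; decide
  by_cases h7 : q = "Content-Type"
  · subst h7; decide
  by_cases h8 : q = "Accept"
  · subst h8; decide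
  by_cases h9 : q = "Referer"
  · subst h9; decide
  by_cases h10 : q = "Accept-Encoding"
  · subst h10; decide
  by_cases h11 : q = "Accept-Language"
  · subst h11; decide
  by_cases h12 : q = "Cookie"
  · subst h12; decide
  rw [pvIdx_eq]
  rw [if_neg h1, if_neg h2, if_neg h3, if_neg h4, if_neg h5, if_neg h6, if_neg h7, if_neg h8, if_neg h9, if_neg h10, if_neg h11, if_neg h12]
  simp [h3]
theorem pvIdx_beq_3 (q : String) : (((pvPriority.getD q (12:Int)).toNat) == (3:Nat)) = (q == "X-NewRelic-ID") := by
  by_cases h1 : q = "Host"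
  · subst h1; decide
  by_cases h2 : q = "Connection"
  · subst h2; decide
  by_cases h3 : q = "Content-Length"
  · subst h3; decide
  by_cases h4 : q = "X-NewRelic-ID"
  · subst h4; decide
  by_cases h5 : q = "Origin"
  · subst h5; decide
  by_cases h6 : q = "User-Agent"
  · subst h6; decide
  by_cases h7 : q = "Content-Type"
  · subst h7; decide
  by_cases h8 : q = "Accept"
  · subst h8; decide
  by_cases h9 : q = "Referer"
  · subst h9; decide
  by_cases h10 : q = "Accept-Encoding"
  · subst h10; decide
  by_cases h11 : q = "Accept-Language"
  · subst h11; decide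
  by_cases h12 : q = "Cookie"
  · subst h12; decide
  rw [pvIdx_eq]
  rw [if_neg h1, if_neg h2, if_neg h3, if_neg h4, if_neg h5, if_neg h6, if_neg h7, if_neg h8, if_neg h9, if_neg h10, if_neg h11, if_neg h12]
  simp [h4]
theorem pvIdx_beq_4 (q : String) : (((pvPriority.getD q (12:Int)).toNat) == (4:Nat)) = (q == "Origin") := by
  by_cases h1 : q = "Host"
  · subst h1; decide
  by_cases h2 : q = "Connection"
  · subst h2; decide
  by_cases h3 : q = "Content-Length"
  · subst h3; decide
  by_cases h4 : q = "X-NewRelic-ID"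
  · subst h4; decide
  by_cases h5 : q = "Origin"
  · subst h5; decide
  by_cases h6 : q = "User-Agent"
  · subst h6; decide
  by_cases h7 : q = "Content-Type"
  · subst h7; decide
  by_cases h8 : q = "Accept"
  · subst h8; decide
  by_cases h9 : q = "Referer"
  · subst h9; decide
  by_cases h10 : q = "Accept-Encoding"
  · subst h10; decide
  by_cases h11 : q = "Accept-Language"
  · subst h11; decide
  by_cases h12 : q = "Cookie"
  · subst h12; decide
  rw [pvIdx_eq]
  rw [if_neg h1, if_neg h2, if_neg h3, if_neg h4, if_neg h5, if_neg h6, if_neg h7, if_neg h8, if_neg h9, if_neg h10, if_neg h11, if_neg h12]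
  simp [h5]
theorem pvIdx_beq_5 (q : String) : (((pvPriority.getD q (12:Int)).toNat) == (5:Nat)) = (q == "User-Agent") := by
  by_cases h1 : q = "Host"
  · subst h1; decide
  by_cases h2 : q = "Connection"
  · subst h2; decide
  by_cases h3 : q = "Content-Length"
  · subst h3; decide
  by_cases h4 : q = "X-NewRelic-ID"
  · subst h4; decide
  by_cases h5 : q = "Origin"
  · subst h5; decide
  by_cases h6 : q = "User-Agent"
  · subst h6; decide
  by_cases h7 : q = "Content-Type"
  · subst h7; decide
  by_cases h8 : q = "Accept"
  · subst h8; decide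
  by_cases h9 : q = "Referer"
  · subst h9; decide
  by_cases h10 : q = "Accept-Encoding"
  · subst h10; decide
  by_cases h11 : q = "Accept-Language"
  · subst h11; decide
  by_cases h12 : q = "Cookie"
  · subst h12; decide
  rw [pvIdx_eq]
  rw [if_neg h1, if_neg h2, if_neg h3, if_neg h4, if_neg h5, if_neg h6, if_neg h7, if_neg h8, if_neg h9, if_neg h10, if_neg h11, if_neg h12]
  simp [h6]
theorem pvIdx_beq_6 (q : String) : (((pvPriority.getD q (12:Int)).toNat) == (6:Nat)) = (q == "Content-Type") := by
  by_cases h1 : q = "Host"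
  · subst h1; decide
  by_cases h2 : q = "Connection"
  · subst h2; decide
  by_cases h3 : q = "Content-Length"
  · subst h3; decide
  by_cases h4 : q = "X-NewRelic-ID"
  · subst h4; decide
  by_cases h5 : q = "Origin"
  · subst h5; decide
  by_cases h6 : q = "User-Agent"
  · subst h6; decide
  by_cases h7 : q = "Content-Type"
  · subst h7; decide
  by_cases h8 : q = "Accept"
  · subst h8; decide
  by_cases h9 : q = "Referer"
  · subst h9; decide
  by_cases h10 : q = "Accept-Encoding"
  · subst h10; decide
  by_cases h11 : q = "Accept-Language"
  · subst h11; decide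
  by_cases h12 : q = "Cookie"
  · subst h12; decide
  rw [pvIdx_eq]
  rw [if_neg h1, if_neg h2, if_neg h3, if_neg h4, if_neg h5, if_neg h6, if_neg h7, if_neg h8, if_neg h9, if_neg h10, if_neg h11, if_neg h12]
  simp [h7]
theorem pvIdx_beq_7 (q : String) : (((pvPriority.getD q (12:Int)).toNat) == (7:Nat)) = (q == "Accept") := by
  by_cases h1 : q = "Host"
  · subst h1; decide
  by_cases h2 : q = "Connection"
  · subst h2; decide
  by_cases h3 : q = "Content-Length"
  · subst h3; decide
  by_cases h4 : q = "X-NewRelic-ID"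
  · subst h4; decide
  by_cases h5 : q = "Origin"
  · subst h5; decide
  by_cases h6 : q = "User-Agent"
  · subst h6; decide
  by_cases h7 : q = "Content-Type"
  · subst h7; decide
  by_cases h8 : q = "Accept"
  · subst h8; decide
  by_cases h9 : q = "Referer"
  · subst h9; decide
  by_cases h10 : q = "Accept-Encoding"
  · subst h10; decide
  by_cases h11 : q = "Accept-Language"
  · subst h11; decide
  by_cases h12 : q = "Cookie"
  · subst h12; decide
  rw [pvIdx_eq]
  rw [if_neg h1, if_neg h2, if_neg h3, if_neg h4, if_neg h5, if_neg h6, if_neg h7, if_neg h8, if_neg h9, if_neg h10, if_neg h11, if_neg h12]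
  simp [h8]
theorem pvIdx_beq_8 (q : String) : (((pvPriority.getD q (12:Int)).toNat) == (8:Nat)) = (q == "Referer") := by
  by_cases h1 : q = "Host"
  · subst h1; decide
  by_cases h2 : q = "Connection"
  · subst h2; decide
  by_cases h3 : q = "Content-Length"
  · subst h3; decide
  by_cases h4 : q = "X-NewRelic-ID"
  · subst h4; decide
  by_cases h5 : q = "Origin"
  · subst h5; decide
  by_cases h6 : q = "User-Agent"
  · subst h6; decide
  by_cases h7 : q = "Content-Type"
  · subst h7; decide
  by_cases h8 : q = "Accept"
  · subst h8; decide
  by_cases h9 : q = "Referer"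
  · subst h9; decide
  by_cases h10 : q = "Accept-Encoding"
  · subst h10; decide
  by_cases h11 : q = "Accept-Language"
  · subst h11; decide
  by_cases h12 : q = "Cookie"
  · subst h12; decide
  rw [pvIdx_eq]
  rw [if_neg h1, if_neg h2, if_neg h3, if_neg h4, if_neg h5, if_neg h6, if_neg h7, if_neg h8, if_neg h9, if_neg h10, if_neg h11, if_neg h12]
  simp [h9]
theorem pvIdx_beq_9 (q : String) : (((pvPriority.getD q (12:Int)).toNat) == (9:Nat)) = (q == "Accept-Encoding") := by
  by_cases h1 : q = "Host"
  · subst h1; decide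
  by_cases h2 : q = "Connection"
  · subst h2; decide
  by_cases h3 : q = "Content-Length"
  · subst h3; decide
  by_cases h4 : q = "X-NewRelic-ID"
  · subst h4; decide
  by_cases h5 : q = "Origin"
  · subst h5; decide
  by_cases h6 : q = "User-Agent"
  · subst h6; decide
  by_cases h7 : q = "Content-Type"
  · subst h7; decide
  by_cases h8 : q = "Accept"
  · subst h8; decide
  by_cases h9 : q = "Referer"
  · subst h9; decide
  by_cases h10 : q = "Accept-Encoding"
  · subst h10; decide
  by_cases h11 : q = "Accept-Language"
  · subst h11; decide
  by_cases h12 : q = "Cookie"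
  · subst h12; decide
  rw [pvIdx_eq]
  rw [if_neg h1, if_neg h2, if_neg h3, if_neg h4, if_neg h5, if_neg h6, if_neg h7, if_neg h8, if_neg h9, if_neg h10, if_neg h11, if_neg h12]
  simp [h10]
theorem pvIdx_beq_10 (q : String) : (((pvPriority.getD q (12:Int)).toNat) == (10:Nat)) = (q == "Accept-Language") := by
  by_cases h1 : q = "Host"
  · subst h1; decide
  by_cases h2 : q = "Connection"
  · subst h2; decide
  by_cases h3 : q = "Content-Length"
  · subst h3; decide
  by_cases h4 : q = "X-NewRelic-ID"
  · subst h4; decide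
  by_cases h5 : q = "Origin"
  · subst h5; decide
  by_cases h6 : q = "User-Agent"
  · subst h6; decide
  by_cases h7 : q = "Content-Type"
  · subst h7; decide
  by_cases h8 : q = "Accept"
  · subst h8; decide
  by_cases h9 : q = "Referer"
  · subst h9; decide
  by_cases h10 : q = "Accept-Encoding"
  · subst h10; decide
  by_cases h11 : q = "Accept-Language"
  · subst h11; decide
  by_cases h12 : q = "Cookie"
  · subst h12; decide
  rw [pvIdx_eq]
  rw [if_neg h1, if_neg h2, if_neg h3, if_neg h4, if_neg h5, if_neg h6, if_neg h7, if_neg h8, if_neg h9, if_neg h10, if_neg h11, if_neg h12]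
  simp [h11]
theorem pvIdx_beq_11 (q : String) : (((pvPriority.getD q (12:Int)).toNat) == (11:Nat)) = (q == "Cookie") := by
  by_cases h1 : q = "Host"
  · subst h1; decide
  by_cases h2 : q = "Connection"
  · subst h2; decide
  by_cases h3 : q = "Content-Length"
  · subst h3; decide
  by_cases h4 : q = "X-NewRelic-ID"
  · subst h4; decide
  by_cases h5 : q = "Origin"
  · subst h5; decide
  by_cases h6 : q = "User-Agent"
  · subst h6; decide
  by_cases h7 : q = "Content-Type"
  · subst h7; decide
  by_cases h8 : q = "Accept"
  · subst h8; decide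
  by_cases h9 : q = "Referer"
  · subst h9; decide
  by_cases h10 : q = "Accept-Encoding"
  · subst h10; decide
  by_cases h11 : q = "Accept-Language"
  · subst h11; decide
  by_cases h12 : q = "Cookie"
  · subst h12; decide
  rw [pvIdx_eq]
  rw [if_neg h1, if_neg h2, if_neg h3, if_neg h4, if_neg h5, if_neg h6, if_neg h7, if_neg h8, if_neg h9, if_neg h10, if_neg h11, if_neg h12]
  simp [h12]
theorem pvIdx_beq_12 (q : String) : (((pvPriority.getD q (12:Int)).toNat) == (12:Nat)) = !(pvHeaderOrder.contains q) := by
  by_cases h1 : q = "Host"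
  · subst h1; decide
  by_cases h2 : q = "Connection"
  · subst h2; decide
  by_cases h3 : q = "Content-Length"
  · subst h3; decide
  by_cases h4 : q = "X-NewRelic-ID"
  · subst h4; decide
  by_cases h5 : q = "Origin"
  · subst h5; decide
  by_cases h6 : q = "User-Agent"
  · subst h6; decide
  by_cases h7 : q = "Content-Type"
  · subst h7; decide
  by_cases h8 : q = "Accept"
  · subst h8; decide
  by_cases h9 : q = "Referer"
  · subst h9; decide
  by_cases h10 : q = "Accept-Encoding"
  · subst h10; decide
  by_cases h11 : q = "Accept-Language"
  · subst h11; decide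
  by_cases h12 : q = "Cookie"
  · subst h12; decide
  rw [pvIdx_eq]
  rw [if_neg h1, if_neg h2, if_neg h3, if_neg h4, if_neg h5, if_neg h6, if_neg h7, if_neg h8, if_neg h9, if_neg h10, if_neg h11, if_neg h12]
  simp [pvHeaderOrder, h1, h2, h3, h4, h5, h6, h7, h8, h9, h10, h11, h12]

theorem map_getElem!_range (l : List (List (String × String))) :
    (List.range l.length).map (fun i => l[i]!) = l := by
  apply List.ext_getElem (by simp)
  intro i h1 h2
  simp [List.getElem!_eq_getElem?_getD, List.getElem?_eq_getElem h2]

theorem bucket_fold :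
    ∀ (l : List (String × String)) (bs : List (List (String × String))), bs.length = 13 →
    (l.foldl (fun bs kv =>
      let i := (pvPriority.getD kv.1 (12 : Int)).toNat
      bs.set i (bs[i]! ++ [kv])) bs)
    = (List.range 13).map (fun i => bs[i]! ++ l.filter (fun kv => (pvPriority.getD kv.1 (12 : Int)).toNat == i)) := by
  intro l
  induction l with
  | nil =>
    intro bs hlen
    rw [← hlen]
    simp only [List.foldl_nil, List.filter_nil, List.append_nil]
    exact (map_getElem!_range bs).symm
  | cons kv t ih =>
    intro bs hlen
    rw [List.foldl_cons]
    obtain ⟨j, hj⟩ : ∃ j, (pvPriority.getD kv.1 (12 : Int)).toNat = j := ⟨_, rfl⟩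
    have hidx : j < 13 := hj ▸ pvIdx_lt kv.1
    simp only [hj]
    have hlen' : (bs.set j (bs[j]! ++ [kv])).length = 13 := by simp [hlen]
    rw [ih _ hlen']
    apply List.map_congr_left
    intro i hi
    have hi13 : i < 13 := List.mem_range.mp hi
    rw [List.filter_cons]
    by_cases hij : i = j
    · subst hij
      have h1 : (bs.set i (bs[i]! ++ [kv]))[i]! = bs[i]! ++ [kv] := by
        rw [List.getElem!_eq_getElem?_getD, List.getElem?_set_self', List.getElem?_eq_getElem (by omega : i < bs.length)]
        simp [List.getElem!_eq_getElem?_getD, List.getElem?_eq_getElem (by omega : i < bs.length)]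
      have h2 : ((pvPriority.getD kv.1 (12 : Int)).toNat == i) = true := by simp [hj]
      rw [h1, h2]
      simp
    · have h1 : (bs.set j (bs[j]! ++ [kv]))[i]! = bs[i]! := by
        rw [List.getElem!_eq_getElem?_getD, List.getElem?_set_ne (by omega), ← List.getElem!_eq_getElem?_getD]
      have h2 : ((pvPriority.getD kv.1 (12 : Int)).toNat == i) = false := by
        simp [hj]; omega
      rw [h1, h2]
      simp

theorem filter_key_eq (hs : List (String × String)) (q : String)
    (hnd : (hs.map Prod.fst).Nodup) :
    hs.filter (fun kv => kv.1 == q) = ((pvLookup hs q).map (fun v => (q, v))).toList := by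
  induction hs with
  | nil => simp [pvLookup]
  | cons p t ih =>
    obtain ⟨k, v⟩ := p
    simp only [List.map_cons, List.nodup_cons] at hnd
    by_cases hk : k = q
    · subst hk
      have hnil : t.filter (fun kv => kv.1 == k) = [] := by
        rw [List.filter_eq_nil_iff]
        intro kv hkv
        simp only [beq_iff_eq]
        rintro rfl
        exact hnd.1 (List.mem_map.mpr ⟨kv, hkv, rfl⟩)
      simp [List.filter_cons, pvLookup, hnil]
    · have : (k == q) = false := beq_eq_false_iff_ne.mpr hk
      simp only [List.filter_cons, this, Bool.false_eq_true, if_false, pvLookup, hk, ih hnd.2]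

theorem A_eq_canon (headers : List (String × String)) (hpre : Pre_modifyheaders headers) :
    modifyheaders headers = pvCanon headers := by
  unfold modifyheaders
  have hempty : (PySem.Dict.empty : PySem.Dict String String).items = [] := rfl
  have h1 := foldAB headers pvHeaderOrder PySem.Dict.empty (by decide)
    PySem.Dict.nodup_keys_empty (by simp [hempty])
  have hfil : pvHeaderOrder.filter (fun q => !(PySem.Dict.empty : PySem.Dict String String).contains q) = pvHeaderOrder := by
    apply List.filter_eq_self.mpr
    intro q _
    simp [PySem.Dict.contains_empty]
  rw [hempty, hfil, List.nil_append] at h1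
  -- h1 : (first fold).items = pvKnown headers
  obtain ⟨d1, hd1⟩ : ∃ d1, pvHeaderOrder.foldl (fun d q =>
      match pvLookup headers q with
      | some v => d.insert q v
      | none => d) PySem.Dict.empty = d1 := ⟨_, rfl⟩
  rw [hd1] at h1
  have hkeys : d1.keys = pvHeaderOrder.filter (fun q => (pvLookup headers q).isSome) := by
    show d1.items.map Prod.fst = _
    rw [h1]; exact map_fst_pvKnown headers
  have hknodup : d1.keys.Nodup := by
    rw [hkeys]; exact (by decide : pvHeaderOrder.Nodup).filter _
  have hinv : ∀ p ∈ d1.items, pvLookup headers p.1 = some p.2 := by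
    intro p hp
    rw [h1] at hp
    obtain ⟨q, hq, hsome⟩ := List.mem_filterMap.mp hp
    cases hl : pvLookup headers q with
    | none => rw [hl] at hsome; simp at hsome
    | some v =>
      rw [hl] at hsome
      simp only [Option.map_some, Option.some.injEq] at hsome
      rw [← hsome]
      simpa using hl
  rw [hd1]
  rw [foldAB headers (headers.map Prod.fst) d1 hpre hknodup hinv, h1]
  have hcong : (headers.map Prod.fst).filter (fun q => !d1.contains q)
      = (headers.map Prod.fst).filter (fun q => !(pvHeaderOrder.contains q)) := by
    apply List.filter_congr
    intro q hq
    have hsome : (pvLookup headers q).isSome = true := (pvLookup_isSome_iff headers q).mpr hq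
    congr 1
    rw [Bool.eq_iff_iff, PySem.Dict.contains_iff_mem_keys, hkeys, List.mem_filter]
    simp [hsome, List.contains_iff_mem]
  rw [hcong, filterMap_keys_filter headers _ hpre]
  rfl

theorem canon_keys_nodup (headers : List (String × String)) (hpre : Pre_modifyheaders headers) :
    ((pvCanon headers).map Prod.fst).Nodup := by
  unfold pvCanon
  rw [List.map_append, map_fst_pvKnown]
  apply List.Nodup.append
  · exact (by decide : pvHeaderOrder.Nodup).filter _
  · exact List.Nodup.sublist (List.filter_sublist.map Prod.fst) hpre
  · intro q hq1 hq2
    have hord : q ∈ pvHeaderOrder := List.mem_of_mem_filter hq1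
    obtain ⟨kv, hkv, rfl⟩ := List.mem_map.mp hq2
    have := List.of_mem_filter hkv
    simp only [Bool.not_eq_eq_eq_not, Bool.not_true, List.contains_eq_mem, decide_eq_false_iff_not] at this
    exact this hord

theorem ofList_items_of_nodup (l : List (String × String)) (hnd : (l.map Prod.fst).Nodup) :
    (PySem.Dict.ofList l).items = l := by
  have h := PySem.Dict.items_foldl_insert_fresh l Prod.fst Prod.snd
    (PySem.Dict.empty : PySem.Dict String String)
    (fun a _ => PySem.Dict.contains_empty a.1) hnd
  have hofl : (PySem.Dict.ofList l : PySem.Dict String String)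
      = l.foldl (fun d a => d.insert a.1 a.2) PySem.Dict.empty := rfl
  rw [hofl, h]
  rw [show (PySem.Dict.empty : PySem.Dict String String).items = [] from rfl]
  simp

theorem B_eq_canon (headers : List (String × String)) (hpre : Pre_modifyheaders headers) :
    modifyheaders_alt headers = pvCanon headers := by
  unfold modifyheaders_alt
  simp only [show pvHeaderOrder.length = 12 from rfl, Nat.cast_ofNat, Nat.reduceAdd]
  rw [bucket_fold headers (List.replicate 13 []) (by simp)]
  have hrep : ∀ i ∈ List.range 13, (List.replicate 13 ([] : List (String × String)))[i]! ++
      headers.filter (fun kv => (pvPriority.getD kv.1 (12:Int)).toNat == i)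
      = headers.filter (fun kv => (pvPriority.getD kv.1 (12:Int)).toNat == i) := by
    intro i hi
    have : (List.replicate 13 ([] : List (String × String)))[i]! = [] := by
      rw [List.getElem!_eq_getElem?_getD, List.getElem?_replicate]
      simp [List.mem_range.mp hi]
    rw [this, List.nil_append]
  rw [List.map_congr_left hrep]
  rw [show List.range 13 = [0,1,2,3,4,5,6,7,8,9,10,11,12] from by decide]
  simp only [List.map_cons, List.map_nil, List.flatten_cons, List.flatten_nil]
  simp only [pvIdx_beq_0, pvIdx_beq_1, pvIdx_beq_2, pvIdx_beq_3, pvIdx_beq_4, pvIdx_beq_5,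
    pvIdx_beq_6, pvIdx_beq_7, pvIdx_beq_8, pvIdx_beq_9, pvIdx_beq_10, pvIdx_beq_11, pvIdx_beq_12]
  simp only [filter_key_eq headers _ hpre]
  have hflat : ((pvLookup headers "Host").map (fun v => ("Host", v))).toList ++
      (((pvLookup headers "Connection").map (fun v => ("Connection", v))).toList ++
      (((pvLookup headers "Content-Length").map (fun v => ("Content-Length", v))).toList ++
      (((pvLookup headers "X-NewRelic-ID").map (fun v => ("X-NewRelic-ID", v))).toList ++
      (((pvLookup headers "Origin").map (fun v => ("Origin", v))).toList ++
      (((pvLookup headers "User-Agent").map (fun v => ("User-Agent", v))).toList ++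
      (((pvLookup headers "Content-Type").map (fun v => ("Content-Type", v))).toList ++
      (((pvLookup headers "Accept").map (fun v => ("Accept", v))).toList ++
      (((pvLookup headers "Referer").map (fun v => ("Referer", v))).toList ++
      (((pvLookup headers "Accept-Encoding").map (fun v => ("Accept-Encoding", v))).toList ++
      (((pvLookup headers "Accept-Language").map (fun v => ("Accept-Language", v))).toList ++
      (((pvLookup headers "Cookie").map (fun v => ("Cookie", v))).toList ++
      (headers.filter (fun kv => !(pvHeaderOrder.contains kv.1)) ++ []))))))))))))
      = pvCanon headers := by
    unfold pvCanon pvKnown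
    rw [List.filterMap_eq_flatMap_toList]
    simp [pvHeaderOrder, List.flatMap_cons, List.flatMap_nil]
  rw [hflat, ofList_items_of_nodup _ (canon_keys_nodup headers hpre)]

-- ===== VERDICT (by name: the statement is the Claim_ definition above) =====
theorem modifyheaders_spec : Claim_equal_modifyheaders := by
  intro headers _ hpre
  unfold Spec_modifyheaders
  rw [A_eq_canon headers hpre, B_eq_canon headers hpre]
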